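-- pv_equiv track=rewrite | github.com/Kandbox-kuaihe/mes-server | src/dispatch/common/utils/read_menu_js.py | split_and_capitalize
-- ===== SOURCE A (Python) =====
-- def split_and_capitalize(s):
--     # 将字符串分割成单词列表，假设单词由驼峰命名法连接
--     words = []
--     new_word = ''
--     for char in s:
--         if char.isupper():
--             if new_word:
--                 words.append(new_word)
--             new_word = char  # 开始一个新单词
--         else:
--             new_word += char  # 将字符添加到当前单词
--     if new_word:  # 添加最后一个单词
--         words.append(new_word)
--
--     # 将单词首字母大写，并用空格连接
--     capitalized_words = [word.capitalize() for word in words]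
--     return ' '.join(capitalized_words)
-- ===== SOURCE B (Python) =====
-- def split_and_capitalize(s):
--     idx = [i for i, c in enumerate(s) if c.isupper()]
--     bounds = [0] + idx + [len(s)]
--     parts = [s[a:b] for a, b in zip(bounds, bounds[1:])]
--     return ' '.join(p.capitalize() for p in parts if p)
-- ===== Notes on version B (the rewrite author's own statement) =====
-- stated objective: alternative
-- what changed: Replaces A's char-by-char word-accumulator loop with an index-table-then-slice pass: collect the uppercase positions, form bounds [0]+idx+[len(s)], slice the string between consecutive bounds, and join the capitalized nonempty slices.
import Mathlib
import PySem

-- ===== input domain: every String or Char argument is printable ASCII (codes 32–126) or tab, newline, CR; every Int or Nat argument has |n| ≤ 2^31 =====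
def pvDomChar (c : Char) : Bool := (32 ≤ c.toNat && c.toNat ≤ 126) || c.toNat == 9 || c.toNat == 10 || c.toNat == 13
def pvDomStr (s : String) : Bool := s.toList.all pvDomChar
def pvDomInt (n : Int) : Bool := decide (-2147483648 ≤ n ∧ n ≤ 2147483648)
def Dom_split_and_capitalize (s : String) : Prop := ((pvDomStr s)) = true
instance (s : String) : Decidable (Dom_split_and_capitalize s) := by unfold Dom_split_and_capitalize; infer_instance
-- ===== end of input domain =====

-- B re-implements the camelCase splitter by an index-table-then-slice pass (uppercase positions → bounds → slices) instead of A's char-by-char word accumulator; objective: alternative decomposition, same cost.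

-- shared helper: Python str.capitalize() (first char upper-cased, rest lower-cased), used by both Pythons
def capPy (w : List Char) : List Char :=
  match w with
  | [] => []
  | c :: rest => PySem.Chars.upperChar c :: PySem.Chars.lower rest

-- ===== PORT A =====
def split_and_capitalize (s : String) : String :=
  let r := s.toList.foldl
    (fun (st : List (List Char) × List Char) (ch : Char) =>
      if PySem.Chars.isupper ch then
        ((if !st.2.isEmpty then st.1 ++ [st.2] else st.1), [ch])
      else
        (st.1, st.2 ++ [ch])) ([], [])
  let words := if !r.2.isEmpty then r.1 ++ [r.2] else r.1
  String.ofList (PySem.Chars.join [' '] (words.map capPy))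

-- ===== PORT B =====
def split_and_capitalize_alt (s : String) : String :=
  let cs := s.toList
  let idx : List Int :=
    ((PySem.List.enumerate cs).filter (fun p => PySem.Chars.isupper p.2)).map (fun p => p.1)
  let bounds : List Int := 0 :: idx ++ [(cs.length : Int)]
  let parts : List (List Char) :=
    (bounds.zip (PySem.List.slice bounds (some 1) none)).map
      (fun ab => PySem.List.slice cs (some ab.1) (some ab.2))
  String.ofList (PySem.Chars.join [' '] ((parts.filter (fun p => !p.isEmpty)).map capPy))

-- ===== PRECONDITION & SPEC =====
def Spec_split_and_capitalize (s : String) (out : String) : Prop := out = split_and_capitalize_alt s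
instance (s : String) (out : String) : Decidable (Spec_split_and_capitalize s out) := by unfold Spec_split_and_capitalize; infer_instance

-- ===== CLAIM (what is proved, stated in full; the proofs are below) =====
def Claim_equal_split_and_capitalize : Prop := ∀ (s : String), Dom_split_and_capitalize s → Spec_split_and_capitalize s (split_and_capitalize s)

-- ===== LEMMAS AND PROOFS =====

-- uppercase positions, as naturals
def F0 : List Char → List Nat
  | [] => []
  | c :: cs => if PySem.Chars.isupper c then 0 :: (F0 cs).map (· + 1) else (F0 cs).map (· + 1)

-- (first chunk, later chunks): the camelCase segmentation, first chunk possibly empty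
def chunksCS : List Char → List Char × List (List Char)
  | [] => ([], [])
  | c :: cs =>
    let r := chunksCS cs
    if PySem.Chars.isupper c then ([], (c :: r.1) :: r.2) else (c :: r.1, r.2)

-- segments of xs between consecutive bounds
def segsN (xs : List Char) (bn : List Nat) : List (List Char) :=
  (bn.zip bn.tail).map (fun ab => (xs.drop ab.1).take (ab.2 - ab.1))

lemma upIdx_eq (cs : List Char) : ∀ t : Int,
    ((PySem.List.enumerate cs t).filter (fun p => PySem.Chars.isupper p.2)).map (fun p => p.1)
      = (F0 cs).map (fun n : Nat => (n : Int) + t) := by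
  induction cs with
  | nil => intro t; simp [PySem.List.enumerate, F0]
  | cons c cs ih =>
    intro t
    rw [PySem.List.enumerate_cons]
    by_cases h : PySem.Chars.isupper c
    · simp only [List.filter_cons, h, if_true, ih (t + 1), F0, List.map_cons, List.map_map,
        List.cons.injEq, Nat.cast_zero, zero_add]
      exact ⟨by simp, List.map_congr_left (fun n _ => by simp only [Function.comp_apply]; push_cast; ring)⟩
    · simp only [List.filter_cons, h, Bool.false_eq_true, if_false, ih (t + 1), F0,
        List.map_map]
      exact List.map_congr_left (fun n _ => by simp only [Function.comp_apply]; push_cast; ring)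

lemma segsN_shift (c : Char) (xs : List Char) : ∀ bn : List Nat,
    segsN (c :: xs) (bn.map (· + 1)) = segsN xs bn := by
  intro bn
  unfold segsN
  have ht : (bn.map (· + 1)).tail = bn.tail.map (· + 1) := by
    cases bn <;> simp
  rw [ht, List.zip_map, List.map_map]
  exact List.map_congr_left (fun ab _ => by
    simp [Nat.add_sub_add_right, List.drop_succ_cons])

lemma segsN_cons_shift (c : Char) (xs : List Char) (bn : List Nat) :
    segsN (c :: xs) (0 :: bn.map (· + 1))
      = match segsN xs (0 :: bn) with
        | [] => []
        | h :: t => (c :: h) :: t := by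
  cases bn with
  | nil => simp [segsN]
  | cons b bn' =>
    have h1 : segsN (c :: xs) (0 :: (b :: bn').map (· + 1))
        = ((c :: xs).take (b + 1)) :: segsN (c :: xs) ((b :: bn').map (· + 1)) := by
      simp [segsN]
    have h2 : segsN xs (0 :: b :: bn') = (xs.take b) :: segsN xs (b :: bn') := by
      simp [segsN]
    rw [h1, segsN_shift, h2]
    simp

lemma segsN_chunks (cs : List Char) :
    segsN cs (0 :: (F0 cs ++ [cs.length])) = (chunksCS cs).1 :: (chunksCS cs).2 := by
  induction cs with
  | nil => simp [segsN, F0, chunksCS]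
  | cons c cs ih =>
    by_cases h : PySem.Chars.isupper c
    · have hmap : F0 (c :: cs) ++ [(c :: cs).length]
          = 0 :: ((F0 cs ++ [cs.length]).map (· + 1)) := by simp [F0, h]
      rw [hmap]
      have hstep : segsN (c :: cs) (0 :: 0 :: (F0 cs ++ [cs.length]).map (· + 1))
          = [] :: segsN (c :: cs) (0 :: (F0 cs ++ [cs.length]).map (· + 1)) := by
        simp [segsN]
      rw [hstep, segsN_cons_shift, ih]
      simp [chunksCS, h]
    · have hmap : F0 (c :: cs) ++ [(c :: cs).length]
          = (F0 cs ++ [cs.length]).map (· + 1) := by simp [F0, h]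
      rw [hmap, segsN_cons_shift, ih]
      simp [chunksCS, h]

-- A's loop, named for the invariant
def stepA (st : List (List Char) × List Char) (ch : Char) : List (List Char) × List Char :=
  if PySem.Chars.isupper ch then
    ((if !st.2.isEmpty then st.1 ++ [st.2] else st.1), [ch])
  else
    (st.1, st.2 ++ [ch])

def finishA (st : List (List Char) × List Char) : List (List Char) :=
  if !st.2.isEmpty then st.1 ++ [st.2] else st.1

lemma foldA_invariant (cs : List Char) : ∀ (ws : List (List Char)) (nw : List Char),
    finishA (cs.foldl stepA (ws, nw))
      = ws ++ (((nw ++ (chunksCS cs).1) :: (chunksCS cs).2).filter (fun p => !p.isEmpty)) := by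
  induction cs with
  | nil =>
    intro ws nw
    cases nw <;> simp [finishA, chunksCS]
  | cons c cs ih =>
    intro ws nw
    by_cases h : PySem.Chars.isupper c
    · have hstep : stepA (ws, nw) c
          = ((if !nw.isEmpty then ws ++ [nw] else ws), [c]) := by simp [stepA, h]
      rw [List.foldl_cons, hstep, ih]
      cases nw <;> simp [chunksCS, h]
    · have hstep : stepA (ws, nw) c = (ws, nw ++ [c]) := by simp [stepA, h]
      rw [List.foldl_cons, hstep, ih]
      simp [chunksCS, h]

lemma partsB_eq (cs : List Char) :
    ((0 :: (((PySem.List.enumerate cs).filter (fun p => PySem.Chars.isupper p.2)).map (fun p => p.1))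
        ++ [(cs.length : Int)]).zip
      (PySem.List.slice (0 :: (((PySem.List.enumerate cs).filter (fun p => PySem.Chars.isupper p.2)).map (fun p => p.1))
        ++ [(cs.length : Int)]) (some 1) none)).map
      (fun ab => PySem.List.slice cs (some ab.1) (some ab.2))
      = (chunksCS cs).1 :: (chunksCS cs).2 := by
  have hidx : ((PySem.List.enumerate cs).filter (fun p => PySem.Chars.isupper p.2)).map (fun p => p.1)
      = (F0 cs).map (fun n : Nat => (n : Int)) := by
    rw [upIdx_eq cs 0]
    exact List.map_congr_left (fun n _ => by simp)
  have hbounds : (0 :: (((PySem.List.enumerate cs).filter (fun p => PySem.Chars.isupper p.2)).map (fun p => p.1))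
      ++ [(cs.length : Int)]) = (0 :: (F0 cs ++ [cs.length])).map (fun n : Nat => (n : Int)) := by
    rw [hidx]
    simp only [List.map_cons, List.map_append, List.map_nil, Nat.cast_zero]
    rw [List.cons_append]
  rw [hbounds]
  set bn : List Nat := 0 :: (F0 cs ++ [cs.length]) with hbn
  have hslice : PySem.List.slice (bn.map (fun n : Nat => (n : Int))) (some 1) none
      = (bn.map (fun n : Nat => (n : Int))).tail := by
    simp [PySem.List.slice]
    cases bn <;> simp
  rw [hslice]
  have ht : (bn.map (fun n : Nat => (n : Int))).tail = bn.tail.map (fun n : Nat => (n : Int)) := by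
    cases bn <;> simp
  rw [ht, List.zip_map, List.map_map]
  have hpt : ∀ ab : Nat × Nat,
      (fun ab : Int × Int => PySem.List.slice cs (some ab.1) (some ab.2))
        ((Prod.map (fun n : Nat => (n : Int)) (fun n : Nat => (n : Int))) ab)
        = (cs.drop ab.1).take (ab.2 - ab.1) := by
    intro ab
    simp only [Prod.map]
    rw [PySem.List.slice_toNat cs (by positivity) (by positivity)]
    simp
  calc (bn.zip bn.tail).map _ = (bn.zip bn.tail).map (fun ab => (cs.drop ab.1).take (ab.2 - ab.1)) :=
        List.map_congr_left (fun ab _ => hpt ab)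
    _ = segsN cs bn := rfl
    _ = (chunksCS cs).1 :: (chunksCS cs).2 := segsN_chunks cs

-- ===== VERDICT (by name: the statement is the Claim_ definition above) =====
theorem split_and_capitalize_spec : Claim_equal_split_and_capitalize := by
  intro s _
  unfold Spec_split_and_capitalize split_and_capitalize split_and_capitalize_alt
  simp only []
  rw [partsB_eq s.toList]
  have hA : s.toList.foldl
      (fun (st : List (List Char) × List Char) (ch : Char) =>
        if PySem.Chars.isupper ch then
          ((if !st.2.isEmpty then st.1 ++ [st.2] else st.1), [ch])
        else
          (st.1, st.2 ++ [ch])) ([], []) = s.toList.foldl stepA ([], []) := rfl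
  rw [hA]
  have := foldA_invariant s.toList [] []
  unfold finishA at this
  rw [this]
  simp
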